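-- pv_equiv track=rewrite | github.com/Liwenwen5/LA-GCN | infer.py | reshape_dependency_tree_new
-- ===== SOURCE A (Python) =====
-- from copy import copy, deepcopy
--
-- def reshape_dependency_tree_new(as_start, as_end, dependencies,tags, multi_hop=False, tokens=None, max_hop = 5):
--     dep_tag = []
--     dep_idx = []
--     for i in range(as_start, as_end):
--         for dep in dependencies:
--             if i == dep[1] - 1:
--                 if (dep[2] - 1 < as_start or dep[2] - 1 >= as_end) and dep[2] != 0 and dep[2] - 1 not in dep_idx:
--                     if str(dep[0]) != 'punct':
--                         dep_tag.append(dep[0])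
--                     else:
--                         dep_tag.append('<pad>')
--                     dep_idx.append(dep[2] - 1)
--             elif i == dep[2] - 1:
--                 if (dep[1] - 1 < as_start or dep[1] - 1 >= as_end) and dep[1] != 0 and dep[1] - 1 not in dep_idx:
--                     if str(dep[0]) != 'punct':
--                         dep_tag.append(dep[0])
--                     else:
--                         dep_tag.append('<pad>')
--                     dep_idx.append(dep[1] - 1)
--
--     if multi_hop:
--         current_hop = 2
--         added = True
--         while current_hop <= max_hop and len(dep_idx) < len(tokens) and added:
--             added = False
--             dep_idx_temp = deepcopy(dep_idx)
--             for i in dep_idx_temp: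
--                 for dep in dependencies:
--                     if i == dep[1] - 1:
--                         if (dep[2] - 1 < as_start or dep[2] - 1 >= as_end) and dep[2] != 0 and dep[2] - 1 not in dep_idx:
--                             if str(dep[0]) != 'punct':
--                                 dep_tag.append(dep[0])
--                             else:
--                                 dep_tag.append('<pad>')
--                             dep_idx.append(dep[2] - 1)
--                             added = True
--                     elif i == dep[2] - 1:
--                         # not root, not aspect
--                         if (dep[1] - 1 < as_start or dep[1] - 1 >= as_end) and dep[1] != 0 and dep[1] - 1 not in dep_idx:
--                             if str(dep[0]) != 'punct':
--                                 dep_tag.append(dep[0])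
--                             else:
--                                 dep_tag.append('<pad>')
--                             dep_idx.append(dep[1] - 1)
--                             added = True
--             current_hop += 1
--
--     index = [i[0] for i in sorted(enumerate(dep_idx), key=lambda x:x[1])]
--     dep_tag = [dep_tag[i] for i in index]
--     dep_idx = [dep_idx[i] for i in index]
--
--     return dep_tag, dep_idx
-- ===== SOURCE B (Python) =====
-- def reshape_dependency_tree_new(as_start, as_end, dependencies, tags, multi_hop=False, tokens=None, max_hop=5):
--     # Index dependencies by (0-based) endpoint once, then walk outward hop by hop
--     # over a frontier of newly discovered nodes, with set-based membership.
--     adj = {}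
--     for tag, h, d in dependencies:
--         adj.setdefault(h - 1, []).append((tag, d))
--         if d - 1 != h - 1:
--             adj.setdefault(d - 1, []).append((tag, h))
--
--     dep_tag, dep_idx, seen = [], [], set()
--
--     def absorb(node, out_new):
--         for tag, other in adj.get(node, ()):
--             j = other - 1
--             if (j < as_start or j >= as_end) and other != 0 and j not in seen:
--                 dep_tag.append(tag if tag != 'punct' else '<pad>')
--                 dep_idx.append(j)
--                 seen.add(j)
--                 out_new.append(j)
--
--     frontier = []
--     for i in range(as_start, as_end):
--         absorb(i, frontier)
--
--     if multi_hop: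
--         hop = 2
--         while hop <= max_hop and len(dep_idx) < len(tokens) and frontier:
--             new = []
--             for i in frontier:
--                 absorb(i, new)
--             frontier = new
--             hop += 1
--
--     pairs = sorted(zip(dep_idx, dep_tag), key=lambda p: p[0])
--     return [t for _, t in pairs], [j for j, _ in pairs]
-- ===== Notes on version B (the rewrite author's own statement) =====
-- stated objective: faster
-- what changed: B builds an adjacency index keyed by 0-based endpoint once and does a frontier-only BFS over hops with a set for membership, then sorts the (idx,tag) pairs directly, instead of A's per-node rescans of the whole dependency list, whole-accumulated-list rescans each hop, linear 'not in' membership, and enumerate-sort-permute finish.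
import Mathlib
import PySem

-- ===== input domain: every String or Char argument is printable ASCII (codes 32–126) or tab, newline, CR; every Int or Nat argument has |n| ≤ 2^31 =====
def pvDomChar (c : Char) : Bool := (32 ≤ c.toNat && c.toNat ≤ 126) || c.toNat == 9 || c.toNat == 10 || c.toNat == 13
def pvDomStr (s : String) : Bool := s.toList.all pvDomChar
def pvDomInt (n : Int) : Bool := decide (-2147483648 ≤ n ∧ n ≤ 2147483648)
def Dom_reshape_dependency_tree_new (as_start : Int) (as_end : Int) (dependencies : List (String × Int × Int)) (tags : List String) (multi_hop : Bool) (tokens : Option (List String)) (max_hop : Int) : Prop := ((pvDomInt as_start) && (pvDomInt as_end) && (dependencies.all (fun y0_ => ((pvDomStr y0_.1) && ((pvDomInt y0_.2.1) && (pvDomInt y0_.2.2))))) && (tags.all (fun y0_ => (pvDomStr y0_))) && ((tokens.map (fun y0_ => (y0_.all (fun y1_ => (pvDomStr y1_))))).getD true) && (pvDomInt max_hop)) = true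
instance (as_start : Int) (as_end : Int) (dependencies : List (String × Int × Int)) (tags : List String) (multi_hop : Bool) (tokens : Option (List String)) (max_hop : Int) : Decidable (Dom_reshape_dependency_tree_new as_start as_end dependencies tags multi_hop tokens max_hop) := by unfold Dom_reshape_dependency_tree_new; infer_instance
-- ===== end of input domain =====

-- ===== PORT A =====
-- B replaces A's per-node rescans of the dependency list and whole-list rescans per hop
-- by a one-time adjacency index, a frontier-only hop walk with set membership, and a direct
-- sort of (idx, tag) pairs; objective: faster.

-- one inner-loop step of A's first pass: 'for dep in dependencies: if i == dep[1]-1 … elif i == dep[2]-1 …'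
def rdtDepA (as_start as_end : Int) (i : Int) (st : List String × List Int) (dep : String × Int × Int) : List String × List Int :=
  if i = dep.2.1 - 1 then
    if (dep.2.2 - 1 < as_start ∨ as_end ≤ dep.2.2 - 1) ∧ dep.2.2 ≠ 0 ∧ dep.2.2 - 1 ∉ st.2 then
      (st.1 ++ [if dep.1 ≠ "punct" then dep.1 else "<pad>"], st.2 ++ [dep.2.2 - 1])
    else st
  else if i = dep.2.2 - 1 then
    if (dep.2.1 - 1 < as_start ∨ as_end ≤ dep.2.1 - 1) ∧ dep.2.1 ≠ 0 ∧ dep.2.1 - 1 ∉ st.2 then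
      (st.1 ++ [if dep.1 ≠ "punct" then dep.1 else "<pad>"], st.2 ++ [dep.2.1 - 1])
    else st
  else st

-- the same body inside the multi-hop while loop, which additionally sets 'added = True'
def rdtDepAH (as_start as_end : Int) (i : Int) (st : List String × List Int × Bool) (dep : String × Int × Int) : List String × List Int × Bool :=
  if i = dep.2.1 - 1 then
    if (dep.2.2 - 1 < as_start ∨ as_end ≤ dep.2.2 - 1) ∧ dep.2.2 ≠ 0 ∧ dep.2.2 - 1 ∉ st.2.1 then
      (st.1 ++ [if dep.1 ≠ "punct" then dep.1 else "<pad>"], st.2.1 ++ [dep.2.2 - 1], true)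
    else st
  else if i = dep.2.2 - 1 then
    if (dep.2.1 - 1 < as_start ∨ as_end ≤ dep.2.1 - 1) ∧ dep.2.1 ≠ 0 ∧ dep.2.1 - 1 ∉ st.2.1 then
      (st.1 ++ [if dep.1 ≠ "punct" then dep.1 else "<pad>"], st.2.1 ++ [dep.2.1 - 1], true)
    else st
  else st

-- 'while current_hop <= max_hop and len(dep_idx) < len(tokens) and added:' — at most max_hop - 1 iterations
def rdtLoopA (as_start as_end : Int) (deps : List (String × Int × Int)) (ntoks : Nat) : Nat → List String × List Int → Bool → List String × List Int
  | 0, st, _ => st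
  | fuel + 1, st, added =>
    if st.2.length < ntoks ∧ added = true then
      let r := st.2.foldl (fun acc i => deps.foldl (rdtDepAH as_start as_end i) acc) (st.1, st.2, false)
      rdtLoopA as_start as_end deps ntoks fuel (r.1, r.2.1) r.2.2
    else st

def reshape_dependency_tree_new (as_start : Int) (as_end : Int) (dependencies : List (String × Int × Int)) (tags : List String) (multi_hop : Bool) (tokens : Option (List String)) (max_hop : Int) : List String × List Int :=
  let st1 := (PySem.List.pyRange as_start as_end 1).foldl (fun st i => dependencies.foldl (rdtDepA as_start as_end i) st) (([] : List String), ([] : List Int))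
  -- len(tokens): Pre_ excludes the inputs where the Python raises TypeError here (tokens = None with the loop reachable)
  let st2 := if multi_hop then rdtLoopA as_start as_end dependencies ((tokens.getD []).length) ((max_hop - 1).toNat) st1 true else st1
  let se := PySem.List.sorted (PySem.List.enumerate st2.2 0) (fun p => p.2) false
  let index := se.map (fun p => p.1)
  (index.map (fun i => PySem.List.pyGetD st2.1 i ""), index.map (fun i => PySem.List.pyGetD st2.2 i 0))

-- ===== PORT B =====
def pvPad (t : String) : String := if t ≠ "punct" then t else "<pad>"

-- adjacency index: adj.setdefault(h-1, []).append((tag, d)); if d-1 != h-1: adj.setdefault(d-1, []).append((tag, h))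
def rdtAdj (deps : List (String × Int × Int)) : PySem.Dict Int (List (String × Int)) :=
  deps.foldl (fun a dep =>
    let a := a.modify (dep.2.1 - 1) [] (· ++ [(dep.1, dep.2.2)])
    if dep.2.2 - 1 ≠ dep.2.1 - 1 then a.modify (dep.2.2 - 1) [] (· ++ [(dep.1, dep.2.1)]) else a)
    PySem.Dict.empty

-- one neighbour of 'absorb': state = (dep_tag, dep_idx, seen, out_new)
def rdtAdd (as_start as_end : Int) (st : List String × List Int × PySem.Set Int × List Int) (e : String × Int) : List String × List Int × PySem.Set Int × List Int :=
  if (e.2 - 1 < as_start ∨ as_end ≤ e.2 - 1) ∧ e.2 ≠ 0 ∧ e.2 - 1 ∉ st.2.2.1 then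
    (st.1 ++ [pvPad e.1], st.2.1 ++ [e.2 - 1], PySem.Set.add st.2.2.1 (e.2 - 1), st.2.2.2 ++ [e.2 - 1])
  else st

def rdtAbsorb (as_start as_end : Int) (adj : PySem.Dict Int (List (String × Int))) (st : List String × List Int × PySem.Set Int × List Int) (i : Int) : List String × List Int × PySem.Set Int × List Int :=
  (adj.getD i []).foldl (rdtAdd as_start as_end) st

-- 'while hop <= max_hop and len(dep_idx) < len(tokens) and frontier:' — state = (dep_tag, dep_idx, seen)
def rdtLoopB (as_start as_end : Int) (adj : PySem.Dict Int (List (String × Int))) (ntoks : Nat) : Nat → List String × List Int × PySem.Set Int → List Int → List String × List Int × PySem.Set Int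
  | 0, st, _ => st
  | fuel + 1, st, frontier =>
    if st.2.1.length < ntoks ∧ frontier ≠ [] then
      let r := frontier.foldl (rdtAbsorb as_start as_end adj) (st.1, st.2.1, st.2.2, ([] : List Int))
      rdtLoopB as_start as_end adj ntoks fuel (r.1, r.2.1, r.2.2.1) r.2.2.2
    else st

def reshape_dependency_tree_new_alt (as_start : Int) (as_end : Int) (dependencies : List (String × Int × Int)) (tags : List String) (multi_hop : Bool) (tokens : Option (List String)) (max_hop : Int) : List String × List Int :=
  let adj := rdtAdj dependencies
  let p1 := (PySem.List.pyRange as_start as_end 1).foldl (rdtAbsorb as_start as_end adj) (([] : List String), ([] : List Int), (PySem.Set.empty : PySem.Set Int), ([] : List Int))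
  -- len(tokens): Pre_ excludes the inputs where the Python raises TypeError here (tokens = None with the loop reachable)
  let st := if multi_hop then rdtLoopB as_start as_end adj ((tokens.getD []).length) ((max_hop - 1).toNat) (p1.1, p1.2.1, p1.2.2.1) p1.2.2.2 else (p1.1, p1.2.1, p1.2.2.1)
  let pairs := PySem.List.sorted (st.2.1.zip st.1) (fun p => p.1) false
  (pairs.map (fun p => p.2), pairs.map (fun p => p.1))

-- ===== PRECONDITION & SPEC =====
-- Pre_ excludes exactly the inputs on which Python A raises TypeError at 'len(tokens)':
-- multi_hop set, the while loop reachable (max_hop >= 2), and tokens = None.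
def Pre_reshape_dependency_tree_new (as_start : Int) (as_end : Int) (dependencies : List (String × Int × Int)) (tags : List String) (multi_hop : Bool) (tokens : Option (List String)) (max_hop : Int) : Prop := multi_hop = true → 2 ≤ max_hop → tokens ≠ none
instance (as_start : Int) (as_end : Int) (dependencies : List (String × Int × Int)) (tags : List String) (multi_hop : Bool) (tokens : Option (List String)) (max_hop : Int) : Decidable (Pre_reshape_dependency_tree_new as_start as_end dependencies tags multi_hop tokens max_hop) := by unfold Pre_reshape_dependency_tree_new; infer_instance

def pvWitness_reshape_dependency_tree_new : Int × Int × (List (String × Int × Int)) × List String × Bool × Option (List String) × Int := (0, 1, [("nsubj", 1, 2)], ["NN"], true, some ["a", "b"], 5)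

def Spec_reshape_dependency_tree_new (as_start : Int) (as_end : Int) (dependencies : List (String × Int × Int)) (tags : List String) (multi_hop : Bool) (tokens : Option (List String)) (max_hop : Int) (out : List String × List Int) : Prop := out = reshape_dependency_tree_new_alt as_start as_end dependencies tags multi_hop tokens max_hop
instance (as_start : Int) (as_end : Int) (dependencies : List (String × Int × Int)) (tags : List String) (multi_hop : Bool) (tokens : Option (List String)) (max_hop : Int) (out : List String × List Int) : Decidable (Spec_reshape_dependency_tree_new as_start as_end dependencies tags multi_hop tokens max_hop out) := by unfold Spec_reshape_dependency_tree_new; infer_instance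

-- ===== CLAIM (what is proved, stated in full; the proofs are below) =====
def Claim_equal_reshape_dependency_tree_new : Prop := ∀ (as_start : Int) (as_end : Int) (dependencies : List (String × Int × Int)) (tags : List String) (multi_hop : Bool) (tokens : Option (List String)) (max_hop : Int), Dom_reshape_dependency_tree_new as_start as_end dependencies tags multi_hop tokens max_hop → Pre_reshape_dependency_tree_new as_start as_end dependencies tags multi_hop tokens max_hop → Spec_reshape_dependency_tree_new as_start as_end dependencies tags multi_hop tokens max_hop (reshape_dependency_tree_new as_start as_end dependencies tags multi_hop tokens max_hop)

-- ===== LEMMAS AND PROOFS =====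

-- the (tag, neighbour) pairs A's inner loop considers for a fixed node i, in dependency order
def rdtEntries (i : Int) : List (String × Int × Int) → List (String × Int)
  | [] => []
  | dep :: rest =>
    (if dep.2.1 - 1 = i then [(dep.1, dep.2.2)]
     else if dep.2.2 - 1 = i then [(dep.1, dep.2.1)] else []) ++ rdtEntries i rest

-- the canonical 'try to add one neighbour' step on the (tags, idxs) state
def rdtTry (as_start as_end : Int) (st : List String × List Int) (e : String × Int) : List String × List Int :=
  if (e.2 - 1 < as_start ∨ as_end ≤ e.2 - 1) ∧ e.2 ≠ 0 ∧ e.2 - 1 ∉ st.2 then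
    (st.1 ++ [pvPad e.1], st.2 ++ [e.2 - 1])
  else st

def rdtProc (as_start as_end : Int) (deps : List (String × Int × Int)) (st : List String × List Int) (i : Int) : List String × List Int :=
  (rdtEntries i deps).foldl (rdtTry as_start as_end) st

-- every eligible neighbour of every node of 'nodes' is already in 'ix'
def rdtClosed (as_start as_end : Int) (deps : List (String × Int × Int)) (nodes ix : List Int) : Prop :=
  ∀ i ∈ nodes, ∀ e ∈ rdtEntries i deps, (e.2 - 1 < as_start ∨ as_end ≤ e.2 - 1) ∧ e.2 ≠ 0 → e.2 - 1 ∈ ix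

-- ---- adjacency index = rdtEntries ----
theorem rdtAdj_getD (deps : List (String × Int × Int)) (a : PySem.Dict Int (List (String × Int))) (i : Int) :
    (deps.foldl (fun a dep =>
      let a := a.modify (dep.2.1 - 1) [] (· ++ [(dep.1, dep.2.2)])
      if dep.2.2 - 1 ≠ dep.2.1 - 1 then a.modify (dep.2.2 - 1) [] (· ++ [(dep.1, dep.2.1)]) else a) a).getD i []
    = a.getD i [] ++ rdtEntries i deps := by
  induction deps generalizing a with
  | nil => simp [rdtEntries]
  | cons dep rest ih =>
    simp only [List.foldl_cons, ih, rdtEntries]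
    by_cases h2 : dep.2.2 - 1 = dep.2.1 - 1 <;>
      simp only [h2, if_pos, if_neg, ne_eq, not_true_eq_false, not_false_eq_true] <;>
      rw [PySem.Dict.getD_modify] <;> try rw [PySem.Dict.getD_modify]
    · by_cases hi : i = dep.2.1 - 1 <;> simp [hi, eq_comm]
    · have h2' : dep.2.1 ≠ dep.2.2 := by omega
      by_cases hi : i = dep.2.1 - 1 <;> by_cases hj : i = dep.2.2 - 1
      · omega
      · simp [hi, hj, h2', eq_comm, List.append_assoc, PySem.Dict.getD_modify]
      · simp [hi, hj, h2', eq_comm, List.append_assoc, PySem.Dict.getD_modify]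
      · simp [hi, hj, h2', eq_comm, List.append_assoc, PySem.Dict.getD_modify]

theorem rdtAdj_getD' (deps : List (String × Int × Int)) (i : Int) :
    (rdtAdj deps).getD i [] = rdtEntries i deps := by
  have h := rdtAdj_getD deps PySem.Dict.empty i
  simpa [rdtAdj] using h

-- ---- A's inner loop = fold of rdtTry over rdtEntries ----
theorem depA_fold (as_start as_end i : Int) (deps : List (String × Int × Int)) (st : List String × List Int) :
    deps.foldl (rdtDepA as_start as_end i) st = rdtProc as_start as_end deps st i := by
  induction deps generalizing st with
  | nil => simp [rdtProc, rdtEntries]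
  | cons dep rest ih =>
    have hdep : rdtDepA as_start as_end i st dep
        = ((if dep.2.1 - 1 = i then [(dep.1, dep.2.2)]
            else if dep.2.2 - 1 = i then [(dep.1, dep.2.1)] else []) : List (String × Int)).foldl (rdtTry as_start as_end) st := by
      unfold rdtDepA rdtTry pvPad
      by_cases h1 : dep.2.1 - 1 = i
      · subst h1; simp
      · by_cases h2 : dep.2.2 - 1 = i
        · subst h2
          simp [h1, Ne.symm h1]
        · simp [h1, h2, Ne.symm h1, Ne.symm h2]
    simp only [List.foldl_cons, ih, rdtProc, rdtEntries, List.foldl_append, hdep]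

theorem rdtTry_cases (as_start as_end : Int) (st : List String × List Int) (p : String × Int) :
    rdtTry as_start as_end st p = st ∨ rdtTry as_start as_end st p = (st.1 ++ [pvPad p.1], st.2 ++ [p.2 - 1]) := by
  unfold rdtTry; split_ifs <;> simp

-- ---- rdtTry folds only append ----
theorem rdtTry_fold_append (as_start as_end : Int) (ps : List (String × Int)) (tg : List String) (ix : List Int) :
    ∃ a b, ps.foldl (rdtTry as_start as_end) (tg, ix) = (tg ++ a, ix ++ b) := by
  induction ps generalizing tg ix with
  | nil => exact ⟨[], [], by simp⟩
  | cons p ps ih =>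
    simp only [List.foldl_cons]
    rcases rdtTry_cases as_start as_end (tg, ix) p with h | h
    · rw [h]; exact ih tg ix
    · rw [h]
      obtain ⟨a, b, hab⟩ := ih (tg ++ [pvPad p.1]) (ix ++ [p.2 - 1])
      exact ⟨[pvPad p.1] ++ a, [p.2 - 1] ++ b, by simpa [List.append_assoc] using hab⟩

theorem rdtProc_fold_append (as_start as_end : Int) (deps : List (String × Int × Int)) (nodes : List Int) (tg : List String) (ix : List Int) :
    ∃ a b, nodes.foldl (rdtProc as_start as_end deps) (tg, ix) = (tg ++ a, ix ++ b) := by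
  induction nodes generalizing tg ix with
  | nil => exact ⟨[], [], by simp⟩
  | cons n ns ih =>
    simp only [List.foldl_cons, rdtProc]
    obtain ⟨a, b, hab⟩ := rdtTry_fold_append as_start as_end (rdtEntries n deps) tg ix
    rw [hab]
    obtain ⟨a2, b2, hab2⟩ := ih (tg ++ a) (ix ++ b)
    exact ⟨a ++ a2, b ++ b2, by simpa [List.append_assoc] using hab2⟩

theorem rdtTry_fold_mem (as_start as_end : Int) (ps : List (String × Int)) (tg : List String) (ix : List Int) (x : Int) (hx : x ∈ ix) :
    x ∈ (ps.foldl (rdtTry as_start as_end) (tg, ix)).2 := by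
  obtain ⟨a, b, hab⟩ := rdtTry_fold_append as_start as_end ps tg ix
  rw [hab]; simp [hx]

theorem rdtProc_fold_mem (as_start as_end : Int) (deps : List (String × Int × Int)) (nodes : List Int) (tg : List String) (ix : List Int) (x : Int) (hx : x ∈ ix) :
    x ∈ (nodes.foldl (rdtProc as_start as_end deps) (tg, ix)).2 := by
  obtain ⟨a, b, hab⟩ := rdtProc_fold_append as_start as_end deps nodes tg ix
  rw [hab]; simp [hx]

theorem rdtDepA_fold_len (as_start as_end i : Int) (deps : List (String × Int × Int)) (tg : List String) (ix : List Int) :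
    ix.length ≤ ((deps.foldl (rdtDepA as_start as_end i) (tg, ix)).2).length := by
  rw [depA_fold]
  obtain ⟨a, b, hab⟩ := rdtTry_fold_append as_start as_end (rdtEntries i deps) tg ix
  simp [rdtProc, hab]

theorem rdtDepAH_eq (as_start as_end i : Int) (tg : List String) (ix : List Int) (fl : Bool) (dep : String × Int × Int) :
    rdtDepAH as_start as_end i (tg, ix, fl) dep
    = ((rdtDepA as_start as_end i (tg, ix) dep).1, (rdtDepA as_start as_end i (tg, ix) dep).2,
       fl || decide (ix.length < (rdtDepA as_start as_end i (tg, ix) dep).2.length)) := by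
  unfold rdtDepAH rdtDepA
  split_ifs <;> simp

-- ---- the flagged loop body in terms of the unflagged one ----
theorem depAH_fold (as_start as_end i : Int) (deps : List (String × Int × Int)) (tg : List String) (ix : List Int) (fl : Bool) :
    deps.foldl (rdtDepAH as_start as_end i) (tg, ix, fl)
    = ((deps.foldl (rdtDepA as_start as_end i) (tg, ix)).1, (deps.foldl (rdtDepA as_start as_end i) (tg, ix)).2,
       fl || decide (ix.length < (deps.foldl (rdtDepA as_start as_end i) (tg, ix)).2.length)) := by
  induction deps generalizing tg ix fl with
  | nil => simp
  | cons dep rest ih =>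
    simp only [List.foldl_cons, rdtDepAH_eq]
    rw [ih]
    have h1 : ix.length ≤ (rdtDepA as_start as_end i (tg, ix) dep).2.length := by
      have := rdtDepA_fold_len as_start as_end i [dep] tg ix
      simpa using this
    have h2 : (rdtDepA as_start as_end i (tg, ix) dep).2.length
        ≤ ((rest.foldl (rdtDepA as_start as_end i) (rdtDepA as_start as_end i (tg, ix) dep)).2).length := by
      have := rdtDepA_fold_len as_start as_end i rest (rdtDepA as_start as_end i (tg, ix) dep).1 (rdtDepA as_start as_end i (tg, ix) dep).2
      simpa using this
    simp only [Prod.mk.eta]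
    refine Prod.ext rfl (Prod.ext rfl ?_)
    simp only [Bool.or_assoc]
    congr 1
    rw [← Bool.decide_or]
    apply decide_eq_decide.mpr
    constructor
    · rintro (h | h) <;> omega
    · intro h
      by_cases hlt : ix.length < (rdtDepA as_start as_end i (tg, ix) dep).2.length
      · exact Or.inl hlt
      · exact Or.inr (by omega)

theorem hopA_fold (as_start as_end : Int) (deps : List (String × Int × Int)) (nodes : List Int) (tg : List String) (ix : List Int) (fl : Bool) :
    nodes.foldl (fun acc i => deps.foldl (rdtDepAH as_start as_end i) acc) (tg, ix, fl)
    = ((nodes.foldl (rdtProc as_start as_end deps) (tg, ix)).1, (nodes.foldl (rdtProc as_start as_end deps) (tg, ix)).2,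
       fl || decide (ix.length < (nodes.foldl (rdtProc as_start as_end deps) (tg, ix)).2.length)) := by
  induction nodes generalizing tg ix fl with
  | nil => simp
  | cons n ns ih =>
    simp only [List.foldl_cons, depAH_fold, depA_fold]
    rw [ih]
    have h1 : ix.length ≤ (rdtProc as_start as_end deps (tg, ix) n).2.length := by
      obtain ⟨a, b, hab⟩ := rdtTry_fold_append as_start as_end (rdtEntries n deps) tg ix
      simp [rdtProc, hab]
    have h2 : (rdtProc as_start as_end deps (tg, ix) n).2.length
        ≤ ((ns.foldl (rdtProc as_start as_end deps) (rdtProc as_start as_end deps (tg, ix) n)).2).length := by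
      obtain ⟨a, b, hab⟩ := rdtProc_fold_append as_start as_end deps ns (rdtProc as_start as_end deps (tg, ix) n).1 (rdtProc as_start as_end deps (tg, ix) n).2
      simp at hab
      simp [hab]
    simp only [Prod.mk.eta]
    refine Prod.ext rfl (Prod.ext rfl ?_)
    simp only [Bool.or_assoc]
    congr 1
    rw [← Bool.decide_or]
    apply decide_eq_decide.mpr
    constructor
    · rintro (h | h) <;> omega
    · intro h
      by_cases hlt : ix.length < (rdtProc as_start as_end deps (tg, ix) n).2.length
      · exact Or.inl hlt
      · exact Or.inr (by omega)

-- ---- B's 4-state folds in terms of rdtTry / rdtProc ----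
theorem rdtAdd_fold (as_start as_end : Int) (ps : List (String × Int)) (tg : List String) (ix nw : List Int) :
    ps.foldl (rdtAdd as_start as_end) (tg, ix, ix, nw)
    = ((ps.foldl (rdtTry as_start as_end) (tg, ix)).1, (ps.foldl (rdtTry as_start as_end) (tg, ix)).2,
       (ps.foldl (rdtTry as_start as_end) (tg, ix)).2, nw ++ (ps.foldl (rdtTry as_start as_end) (tg, ix)).2.drop ix.length) := by
  induction ps generalizing tg ix nw with
  | nil => simp
  | cons p ps ih =>
    simp only [List.foldl_cons]
    by_cases hc : (p.2 - 1 < as_start ∨ as_end ≤ p.2 - 1) ∧ p.2 ≠ 0 ∧ p.2 - 1 ∉ ix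
    · have hstep : rdtAdd as_start as_end (tg, ix, ix, nw) p
          = (tg ++ [pvPad p.1], ix ++ [p.2 - 1], ix ++ [p.2 - 1], nw ++ [p.2 - 1]) := by
        unfold rdtAdd
        rw [if_pos (by simpa using hc)]
        simp [PySem.Set.add_of_not_mem hc.2.2]
      have hstep' : rdtTry as_start as_end (tg, ix) p = (tg ++ [pvPad p.1], ix ++ [p.2 - 1]) := by
        unfold rdtTry; rw [if_pos (by simpa using hc)]
      rw [hstep, hstep', ih]
      obtain ⟨a, b, hab⟩ := rdtTry_fold_append as_start as_end ps (tg ++ [pvPad p.1]) (ix ++ [p.2 - 1])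
      rw [hab]
      refine Prod.ext rfl (Prod.ext rfl (Prod.ext rfl ?_))
      simp [List.append_assoc, List.drop_left', List.drop_append]
    · have hstep : rdtAdd as_start as_end (tg, ix, ix, nw) p = (tg, ix, ix, nw) := by
        unfold rdtAdd
        rw [if_neg (by simpa using hc)]
      have hstep' : rdtTry as_start as_end (tg, ix) p = (tg, ix) := by
        unfold rdtTry; rw [if_neg (by simpa using hc)]
      rw [hstep, hstep', ih]

theorem rdtAbsorb_fold (as_start as_end : Int) (deps : List (String × Int × Int)) (nodes : List Int) (tg : List String) (ix nw : List Int) :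
    nodes.foldl (rdtAbsorb as_start as_end (rdtAdj deps)) (tg, ix, ix, nw)
    = ((nodes.foldl (rdtProc as_start as_end deps) (tg, ix)).1, (nodes.foldl (rdtProc as_start as_end deps) (tg, ix)).2,
       (nodes.foldl (rdtProc as_start as_end deps) (tg, ix)).2, nw ++ (nodes.foldl (rdtProc as_start as_end deps) (tg, ix)).2.drop ix.length) := by
  induction nodes generalizing tg ix nw with
  | nil => simp
  | cons n ns ih =>
    simp only [List.foldl_cons]
    have hstep : rdtAbsorb as_start as_end (rdtAdj deps) (tg, ix, ix, nw) n
        = ((rdtProc as_start as_end deps (tg, ix) n).1, (rdtProc as_start as_end deps (tg, ix) n).2,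
           (rdtProc as_start as_end deps (tg, ix) n).2, nw ++ (rdtProc as_start as_end deps (tg, ix) n).2.drop ix.length) := by
      unfold rdtAbsorb
      rw [rdtAdj_getD', rdtAdd_fold]
      rfl
    rw [hstep]
    obtain ⟨a, b, hab⟩ := rdtTry_fold_append as_start as_end (rdtEntries n deps) tg ix
    have hab' : rdtProc as_start as_end deps (tg, ix) n = (tg ++ a, ix ++ b) := hab
    rw [hab']
    rw [ih]
    obtain ⟨a2, b2, hab2⟩ := rdtProc_fold_append as_start as_end deps ns (tg ++ a) (ix ++ b)
    simp [hab2, List.append_assoc, List.drop_left', List.drop_append]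

-- ---- closedness ----
theorem rdtTry_fold_closed_id (as_start as_end : Int) (ps : List (String × Int)) (tg : List String) (ix : List Int)
    (h : ∀ e ∈ ps, (e.2 - 1 < as_start ∨ as_end ≤ e.2 - 1) ∧ e.2 ≠ 0 → e.2 - 1 ∈ ix) :
    ps.foldl (rdtTry as_start as_end) (tg, ix) = (tg, ix) := by
  induction ps with
  | nil => simp
  | cons p ps ih =>
    simp only [List.foldl_cons]
    have hstep : rdtTry as_start as_end (tg, ix) p = (tg, ix) := by
      unfold rdtTry
      rw [if_neg]
      rintro ⟨h1, h2, h3⟩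
      exact h3 (h p (List.mem_cons_self) ⟨h1, h2⟩)
    rw [hstep]
    exact ih (fun e he => h e (List.mem_cons_of_mem _ he))

theorem rdtProc_fold_closed_id (as_start as_end : Int) (deps : List (String × Int × Int)) (nodes : List Int) (tg : List String) (ix : List Int)
    (h : rdtClosed as_start as_end deps nodes ix) :
    nodes.foldl (rdtProc as_start as_end deps) (tg, ix) = (tg, ix) := by
  induction nodes with
  | nil => simp
  | cons n ns ih =>
    simp only [List.foldl_cons]
    have hstep : rdtProc as_start as_end deps (tg, ix) n = (tg, ix) :=
      rdtTry_fold_closed_id as_start as_end _ tg ix (h n (List.mem_cons_self))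
    rw [hstep]
    exact ih (fun i hi => h i (List.mem_cons_of_mem _ hi))

theorem rdtTry_fold_post (as_start as_end : Int) (ps : List (String × Int)) (tg : List String) (ix : List Int) :
    ∀ e ∈ ps, (e.2 - 1 < as_start ∨ as_end ≤ e.2 - 1) ∧ e.2 ≠ 0 → e.2 - 1 ∈ (ps.foldl (rdtTry as_start as_end) (tg, ix)).2 := by
  induction ps generalizing tg ix with
  | nil => simp
  | cons p ps ih =>
    intro e he helig
    simp only [List.foldl_cons]
    rcases List.mem_cons.mp he with rfl | he'
    · by_cases hc : (e.2 - 1 < as_start ∨ as_end ≤ e.2 - 1) ∧ e.2 ≠ 0 ∧ e.2 - 1 ∉ ix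
      · have hstep : rdtTry as_start as_end (tg, ix) e = (tg ++ [pvPad e.1], ix ++ [e.2 - 1]) := by
          unfold rdtTry; rw [if_pos (by simpa using hc)]
        rw [hstep]
        exact rdtTry_fold_mem as_start as_end ps _ _ _ (by simp)
      · have hmem : e.2 - 1 ∈ ix := by
          by_contra hnm
          exact hc ⟨helig.1, helig.2, hnm⟩
        have hstep : rdtTry as_start as_end (tg, ix) e = (tg, ix) := by
          unfold rdtTry; rw [if_neg (by simpa using hc)]
        rw [hstep]
        exact rdtTry_fold_mem as_start as_end ps _ _ _ hmem
    · rcases rdtTry_cases as_start as_end (tg, ix) p with hstep | hstep <;> rw [hstep]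
      · exact ih tg ix e he' helig
      · exact ih _ _ e he' helig

theorem rdtProc_fold_post (as_start as_end : Int) (deps : List (String × Int × Int)) (nodes : List Int) (tg : List String) (ix : List Int) :
    rdtClosed as_start as_end deps nodes (nodes.foldl (rdtProc as_start as_end deps) (tg, ix)).2 := by
  induction nodes generalizing tg ix with
  | nil => intro i hi; simp at hi
  | cons n ns ih =>
    intro i hi e he helig
    simp only [List.foldl_cons]
    rcases List.mem_cons.mp hi with rfl | hi'
    · have h1 : e.2 - 1 ∈ (rdtProc as_start as_end deps (tg, ix) i).2 :=
        rdtTry_fold_post as_start as_end _ tg ix e he helig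
      obtain ⟨a, b, hab⟩ := rdtTry_fold_append as_start as_end (rdtEntries i deps) tg ix
      have hab' : rdtProc as_start as_end deps (tg, ix) i = (tg ++ a, ix ++ b) := hab
      rw [hab']
      rw [hab'] at h1
      exact rdtProc_fold_mem as_start as_end deps ns _ _ _ h1
    · obtain ⟨a, b, hab⟩ := rdtTry_fold_append as_start as_end (rdtEntries n deps) tg ix
      have hab' : rdtProc as_start as_end deps (tg, ix) n = (tg ++ a, ix ++ b) := hab
      rw [hab']
      exact ih _ _ i hi' e he helig

theorem rdtLoopB_nil (as_start as_end : Int) (adj : PySem.Dict Int (List (String × Int))) (ntoks fuel : Nat) (st : List String × List Int × PySem.Set Int) :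
    rdtLoopB as_start as_end adj ntoks fuel st [] = st := by
  cases fuel <;> simp [rdtLoopB]

-- ---- the two loops agree ----
theorem rdtLoopA_false (as_start as_end : Int) (deps : List (String × Int × Int)) (ntoks fuel : Nat) (st : List String × List Int) :
    rdtLoopA as_start as_end deps ntoks fuel st false = st := by
  cases fuel <;> simp [rdtLoopA]

theorem rdtLoop_eq (as_start as_end : Int) (deps : List (String × Int × Int)) (ntoks : Nat) :
    ∀ (fuel : Nat) (tg : List String) (pre nw : List Int),
      rdtClosed as_start as_end deps pre (pre ++ nw) →
      rdtLoopA as_start as_end deps ntoks fuel (tg, pre ++ nw) true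
      = ((rdtLoopB as_start as_end (rdtAdj deps) ntoks fuel (tg, pre ++ nw, pre ++ nw) nw).1,
         (rdtLoopB as_start as_end (rdtAdj deps) ntoks fuel (tg, pre ++ nw, pre ++ nw) nw).2.1) := by
  intro fuel
  induction fuel with
  | zero => intro tg pre nw hcl; simp [rdtLoopA, rdtLoopB]
  | succ fuel ih =>
    intro tg pre nw hcl
    by_cases hlen : (pre ++ nw).length < ntoks
    · by_cases hnw : nw = []
      · subst hnw
        simp only [rdtLoopA, rdtLoopB, List.append_nil] at *
        rw [if_pos ⟨hlen, trivial⟩, if_neg (by simp)]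
        rw [hopA_fold]
        rw [rdtProc_fold_closed_id as_start as_end deps pre tg pre hcl]
        simp [rdtLoopA_false]
      · simp only [rdtLoopA, rdtLoopB]
        rw [if_pos ⟨hlen, trivial⟩, if_pos ⟨hlen, hnw⟩]
        rw [hopA_fold, List.foldl_append,
          rdtProc_fold_closed_id as_start as_end deps pre tg (pre ++ nw) hcl,
          rdtAbsorb_fold]
        have hpost := rdtProc_fold_post as_start as_end deps nw tg (pre ++ nw)
        obtain ⟨a, b, hab⟩ := rdtProc_fold_append as_start as_end deps nw tg (pre ++ nw)
        by_cases hb : b = []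
        · subst hb
          rw [hab]
          simp only [List.append_nil, Bool.false_or, List.drop_length]
          simp [rdtLoopA_false, rdtLoopB_nil]
        · have hcl' : rdtClosed as_start as_end deps (pre ++ nw) (pre ++ nw ++ b) := by
            intro i hi e he helig
            rcases List.mem_append.mp hi with hi' | hi'
            · exact List.mem_append_left _ (hcl i hi' e he helig)
            · have := hpost i hi' e he helig
              rw [hab] at this
              exact this
          have hih := ih (tg ++ a) (pre ++ nw) b hcl'
          rw [hab]
          have hdrop : (pre ++ nw ++ b).drop (pre ++ nw).length = b := by simp
          rw [hdrop]
          have hflag : (false || decide ((pre ++ nw).length < (pre ++ nw ++ b).length)) = true := by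
            have : 0 < b.length := List.length_pos_iff.mpr hb
            simp
            omega
          rw [hflag]
          simpa using hih
    · simp only [rdtLoopA, rdtLoopB]
      rw [if_neg (fun h => hlen h.1), if_neg (fun h => hlen h.1)]

-- ---- state invariants for the final sort ----
def rdtInv (st : List String × List Int) : Prop := st.1.length = st.2.length ∧ st.2.Nodup

theorem rdtInv_try_fold (as_start as_end : Int) (ps : List (String × Int)) (st : List String × List Int)
    (h : rdtInv st) : rdtInv (ps.foldl (rdtTry as_start as_end) st) := by
  induction ps generalizing st with
  | nil => simpa using h
  | cons p ps ih =>
    simp only [List.foldl_cons]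
    apply ih
    unfold rdtTry
    split_ifs with hc
    · refine ⟨by simp [h.1], ?_⟩
      simp [List.nodup_append, h.2]
      intro a ha rfl
      exact hc.2.2 ha
    · exact h

theorem rdtInv_proc_fold (as_start as_end : Int) (deps : List (String × Int × Int)) (nodes : List Int) (st : List String × List Int)
    (h : rdtInv st) : rdtInv (nodes.foldl (rdtProc as_start as_end deps) st) := by
  induction nodes generalizing st with
  | nil => simpa using h
  | cons n ns ih =>
    simp only [List.foldl_cons]
    exact ih _ (rdtInv_try_fold as_start as_end _ _ h)

theorem rdtInv_loopA (as_start as_end : Int) (deps : List (String × Int × Int)) (ntoks : Nat) :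
    ∀ (fuel : Nat) (st : List String × List Int) (added : Bool), rdtInv st → rdtInv (rdtLoopA as_start as_end deps ntoks fuel st added) := by
  intro fuel
  induction fuel with
  | zero => intro st added h; simpa [rdtLoopA] using h
  | succ fuel ih =>
    intro st added h
    simp only [rdtLoopA]
    split_ifs with hc
    · rw [hopA_fold]
      apply ih
      have h2 : rdtInv (st.2.foldl (rdtProc as_start as_end deps) (st.1, st.2)) :=
        rdtInv_proc_fold as_start as_end deps st.2 (st.1, st.2) (by simpa using h)
      exact ⟨by simpa using h2.1, by simpa using h2.2⟩
    · exact h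

-- ---- the two finishing steps agree ----
theorem rdtSort_eq (tg : List String) (ix : List Int) (hlen : tg.length = ix.length) (hnd : ix.Nodup) :
    (((PySem.List.sorted (PySem.List.enumerate ix 0) (fun p => p.2) false).map (fun p => p.1)).map (fun i => PySem.List.pyGetD tg i ""),
     ((PySem.List.sorted (PySem.List.enumerate ix 0) (fun p => p.2) false).map (fun p => p.1)).map (fun i => PySem.List.pyGetD ix i 0))
    = ((PySem.List.sorted (ix.zip tg) (fun p => p.1) false).map (fun p => p.2),
       (PySem.List.sorted (ix.zip tg) (fun p => p.1) false).map (fun p => p.1)) := by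
  have hperm : (PySem.List.sorted (PySem.List.enumerate ix 0) (fun p => p.2) false).Perm (PySem.List.enumerate ix 0) :=
    PySem.List.sorted_perm _ _ _
  set se := PySem.List.sorted (PySem.List.enumerate ix 0) (fun p => p.2) false with hse
  have hmem : ∀ p ∈ se, ∃ (k : Nat) (h : k < ix.length), p = ((k : Int), ix[k]) := by
    intro p hp
    have hp' := hperm.mem_iff.mp hp
    rw [PySem.List.mem_enumerate_iff] at hp'
    obtain ⟨k, hk, hpk⟩ := hp'
    exact ⟨k, hk, by simpa using hpk⟩
  have hget_ix : ∀ p ∈ se, PySem.List.pyGetD ix p.1 0 = p.2 := by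
    intro p hp
    obtain ⟨k, hk, rfl⟩ := hmem p hp
    simp only []
    rw [PySem.List.pyGetD_eq_getElem ix 0 (by positivity) (by exact_mod_cast hk)]
    simp
  have hmapzip : (PySem.List.enumerate ix 0).map (fun p => (p.2, PySem.List.pyGetD tg p.1 "")) = ix.zip tg := by
    apply List.ext_getElem
    · simp [PySem.List.length_enumerate, hlen]
    · intro k hk1 hk2
      have hkix : k < ix.length := by
        simpa [PySem.List.length_enumerate] using hk1
      simp only [List.getElem_map, PySem.List.getElem_enumerate, List.getElem_zip]
      refine Prod.ext rfl ?_
      simp only [zero_add]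
      rw [PySem.List.pyGetD_eq_getElem tg "" (by positivity) (by rw [hlen]; exact_mod_cast hkix)]
      simp
  have hys : PySem.List.sorted (ix.zip tg) (fun p => p.1) false
      = se.map (fun p => (p.2, PySem.List.pyGetD tg p.1 "")) := by
    apply PySem.List.sorted_eq_of_perm_of_pairwise_lt
    · exact (hperm.map _).trans (by rw [hmapzip])
    · rw [List.pairwise_map]
      have hle : List.Pairwise (fun a b => a.2 ≤ b.2) se := PySem.List.sorted_pairwise _ _
      have hndse : (se.map (fun p => p.2)).Nodup := by
        have hpm : (se.map (fun p => p.2)).Perm ((PySem.List.enumerate ix 0).map (fun p => p.2)) := hperm.map _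
        rw [PySem.List.map_snd_enumerate] at hpm
        exact hpm.nodup_iff.mpr hnd
      have hne : List.Pairwise (fun a b => a.2 ≠ b.2) se := List.pairwise_map.mp hndse
      exact (hle.and hne).imp (fun h => lt_of_le_of_ne h.1 h.2)
  refine Prod.ext ?_ ?_
  · simp only [hys, List.map_map]
    rfl
  · simp only [hys, List.map_map]
    exact List.map_congr_left (fun p hp => hget_ix p hp)

-- ===== VERDICT (by name: the statement is the Claim_ definition above) =====
theorem reshape_dependency_tree_new_spec : Claim_equal_reshape_dependency_tree_new := by
  unfold Claim_equal_reshape_dependency_tree_new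
  intro as_start as_end dependencies tags multi_hop tokens max_hop hDom hPre
  unfold Spec_reshape_dependency_tree_new reshape_dependency_tree_new reshape_dependency_tree_new_alt
  simp only [depA_fold]
  set S := (PySem.List.pyRange as_start as_end 1).foldl (rdtProc as_start as_end dependencies) (([] : List String), ([] : List Int)) with hSdef
  have hS : rdtInv S := rdtInv_proc_fold _ _ _ _ _ ⟨rfl, List.nodup_nil⟩
  have hB1 : (PySem.List.pyRange as_start as_end 1).foldl (rdtAbsorb as_start as_end (rdtAdj dependencies)) (([] : List String), ([] : List Int), (PySem.Set.empty : PySem.Set Int), ([] : List Int))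
      = (S.1, S.2, S.2, S.2) := by
    have h := rdtAbsorb_fold as_start as_end dependencies (PySem.List.pyRange as_start as_end 1) [] [] []
    simpa [PySem.Set.empty] using h
  rw [hB1]
  cases multi_hop with
  | false =>
    simp only [Bool.false_eq_true, if_false]
    exact rdtSort_eq S.1 S.2 hS.1 hS.2
  | true =>
    simp only [if_true]
    have hcl : rdtClosed as_start as_end dependencies [] ([] ++ S.2) := by
      intro i hi; simp at hi
    have hloop := rdtLoop_eq as_start as_end dependencies ((tokens.getD []).length) ((max_hop - 1).toNat) S.1 [] S.2 hcl
    simp only [List.nil_append] at hloop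
    set L := rdtLoopB as_start as_end (rdtAdj dependencies) ((tokens.getD []).length) ((max_hop - 1).toNat) (S.1, S.2, S.2) S.2 with hLdef
    have hA2 : rdtLoopA as_start as_end dependencies ((tokens.getD []).length) ((max_hop - 1).toNat) S true = (L.1, L.2.1) := by
      rw [← hloop]
    rw [hA2]
    have hInv : rdtInv (L.1, L.2.1) := by
      rw [← hA2]
      exact rdtInv_loopA _ _ _ _ _ _ _ hS
    exact rdtSort_eq L.1 L.2.1 hInv.1 hInv.2
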